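-- pv_equiv track=rewrite | github.com/Andre-Grilo/FP_2425_PROJ1 | projeto1.py | obtem_coluna
-- ===== SOURCE A (Python) =====
-- def obtem_posicao_inteiros(tab):
--     m = len(tab)        #Numero de linhas
--     n = len(tab[0])     #Numero de colunas
--     tuplo1 = ()
--     tuplo2= ()
--
--     for i in range(1,m*n+1):        # Preenche tuplo1 com inteiros de 1 ao total das posições
--         tuplo1 = tuplo1 + (i, )
--
--     for i in range(0, len(tuplo1), n):           # Organiza tuplo1 em grupos de "n" colunas
--         tuplo2 = tuplo2 + (tuplo1[i : i + n], )     # Adiciona uma linha de "n" colunas ao tuplo2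
--
--     #temos assim os numeros das posiçoes ex:((1,2,3,4),(5,6,7,8)...)
--     return tuplo2
--
-- def obtem_coluna(tab,pos):
--     n = len(tab[0])     #numero de colunas
--     tuplo3 = ()
--
--     for i in obtem_posicao_inteiros(tab):       #Encontra a posição correspondente no tabuleiro para determinar a coluna
--         for x in range(0,n):                    #Itera sobre cada linha
--             if i[x] == pos:                     # Se o número na posição x da linha i for igual a "pos", encontramos a coluna
--                 posicao = x                     #Guardamos esse indice
--
--     for i in obtem_posicao_inteiros(tab):       #Coletar todas as posições da coluna encontrada
--         tuplo3 = tuplo3 + (i[posicao], )        #Adiciona o valor correspondente da coluna ao tuplo3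
--     return tuplo3
-- ===== SOURCE B (Python) =====
-- def obtem_coluna(tab, pos):
--     m, n = len(tab), len(tab[0])
--     col = range(1, m * n + 1).index(pos) % n
--     return tuple(col + 1 + i * n for i in range(m))
-- ===== Notes on version B (the rewrite author's own statement) =====
-- stated objective: faster
-- what changed: A builds the full m*n numbering grid twice by quadratic tuple concatenation and scans every cell to locate the column; B locates the column in O(1) with range(1, m*n+1).index(pos) % n and emits the column entries directly in one pass over the rows.
import Mathlib
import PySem

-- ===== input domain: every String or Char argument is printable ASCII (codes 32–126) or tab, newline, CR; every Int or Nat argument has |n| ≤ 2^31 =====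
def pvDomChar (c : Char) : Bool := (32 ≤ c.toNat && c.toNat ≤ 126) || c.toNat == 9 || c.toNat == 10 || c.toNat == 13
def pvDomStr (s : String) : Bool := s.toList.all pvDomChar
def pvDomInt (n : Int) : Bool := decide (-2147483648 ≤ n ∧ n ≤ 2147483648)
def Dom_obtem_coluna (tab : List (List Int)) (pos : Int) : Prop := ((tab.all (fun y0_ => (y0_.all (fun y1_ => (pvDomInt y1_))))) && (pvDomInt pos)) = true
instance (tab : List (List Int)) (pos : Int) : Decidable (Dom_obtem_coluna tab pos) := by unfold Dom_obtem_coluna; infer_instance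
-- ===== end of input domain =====

-- B replaces A's double construction of the full m*n numbering grid and its
-- exhaustive cell scan by the closed-form column index (pos-1) % n and a single
-- pass over the rows (objective: faster).

-- ===== PORT A =====
def obtem_posicao_inteiros (tab : List (List Int)) : List (List Int) :=
  let m : Int := (tab.length : Int)
  -- tab[0]: pyGet? is none only when tab = [] (IndexError, excluded by Pre_)
  let n : Int := (((PySem.List.pyGet? tab 0).getD []).length : Int)
  let tuplo1 : List Int := PySem.List.pyRange 1 (m * n + 1) 1
  let tuplo2 : List (List Int) :=
    (PySem.List.pyRange 0 (tuplo1.length : Int) n).foldl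
      (fun acc i => acc ++ [PySem.List.slice tuplo1 (some i) (some (i + n))]) []
  tuplo2

def obtem_coluna (tab : List (List Int)) (pos : Int) : List Int :=
  let n : Int := (((PySem.List.pyGet? tab 0).getD []).length : Int)
  -- posicao = none exactly when Python's 'posicao' was never assigned (UnboundLocalError, excluded by Pre_)
  let posicao : Option Int :=
    (obtem_posicao_inteiros tab).foldl
      (fun p i =>
        (PySem.List.pyRange 0 n 1).foldl
          (fun p x => if PySem.List.pyGetD i x 0 = pos then some x else p) p)
      none
  (obtem_posicao_inteiros tab).foldl
    (fun acc i => acc ++ [PySem.List.pyGetD i (posicao.getD 0) 0]) []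

-- ===== PORT B =====
def obtem_coluna_alt (tab : List (List Int)) (pos : Int) : List Int :=
  let m : Int := (tab.length : Int)
  -- tab[0]: pyGet? is none only when tab = [] (IndexError, excluded by Pre_)
  let n : Int := (((PySem.List.pyGet? tab 0).getD []).length : Int)
  -- range(1, m*n+1).index(pos): index? is none exactly when pos is off the board (ValueError, excluded by Pre_)
  let col : Int := PySem.Int.mod (((PySem.List.index? (PySem.List.pyRange 1 (m * n + 1) 1) pos).getD 0 : Nat) : Int) n
  (PySem.List.pyRange 0 m 1).map (fun i => col + 1 + i * n)

-- ===== PRECONDITION & SPEC =====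
-- Pre_ excludes exactly the inputs where A raises: tab = [] (IndexError on tab[0]),
-- an empty first row (ValueError: range() arg 3 must not be zero), and pos outside
-- 1..m*n (UnboundLocalError: 'posicao' never assigned).
def Pre_obtem_coluna (tab : List (List Int)) (pos : Int) : Prop :=
  tab ≠ [] ∧ 0 < (tab.headD []).length ∧ 1 ≤ pos ∧
    pos ≤ (tab.length : Int) * ((tab.headD []).length : Int)
instance (tab : List (List Int)) (pos : Int) : Decidable (Pre_obtem_coluna tab pos) := by
  unfold Pre_obtem_coluna; infer_instance
def pvWitness_obtem_coluna : List (List Int) × Int := ([[7, 7], [7, 7]], 3)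

def Spec_obtem_coluna (tab : List (List Int)) (pos : Int) (out : List Int) : Prop := out = obtem_coluna_alt tab pos
instance (tab : List (List Int)) (pos : Int) (out : List Int) : Decidable (Spec_obtem_coluna tab pos out) := by unfold Spec_obtem_coluna; infer_instance

-- ===== CLAIM (what is proved, stated in full; the proofs are below) =====
def Claim_equal_obtem_coluna : Prop := ∀ (tab : List (List Int)) (pos : Int), Dom_obtem_coluna tab pos → Pre_obtem_coluna tab pos → Spec_obtem_coluna tab pos (obtem_coluna tab pos)

-- ===== LEMMAS AND PROOFS =====

-- a fold whose step never changes the accumulator is the identity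
theorem pv_foldl_id {α β : Type} (l : List α) (f : β → α → β) (p : β)
    (h : ∀ q x, x ∈ l → f q x = q) : l.foldl f p = p := by
  induction l generalizing p with
  | nil => rfl
  | cons a as ih =>
      simp only [List.foldl_cons, h p a (by simp)]
      exact ih p (fun q x hx => h q x (by simp [hx]))

-- "assign when the index matches r0" over range m yields that assignment
theorem pv_setfold (m r0 : Nat) (v : Int) (p : Option Int) (h : r0 < m) :
    (List.range m).foldl (fun q r => if r = r0 then some v else q) p = some v := by
  have h1 : List.range' 0 r0 ++ [r0] = List.range' 0 (r0+1) := by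
    simpa using (List.range'_concat (s:=0) (n:=r0) (step:=1)).symm
  have h2 : List.range' 0 (r0+1) ++ List.range' (r0+1) (m-r0-1) = List.range' 0 m := by
    simpa using (List.range'_append (s:=0) (m:=r0+1) (n:=m-r0-1) (step:=1))
    |>.trans (by congr 1; omega)
  have hsplit : List.range m = (List.range' 0 r0 ++ [r0]) ++ List.range' (r0+1) (m-r0-1) := by
    rw [List.range_eq_range', ← h2, h1]
  rw [hsplit, List.foldl_append, List.foldl_append]
  rw [pv_foldl_id (List.range' 0 r0) _ p (by
    intro q x hx
    rcases List.mem_range'.mp hx with ⟨i, hi, rfl⟩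
    rw [if_neg (by omega)])]
  simp only [List.foldl_cons, List.foldl_nil, if_true]
  apply pv_foldl_id
  intro q x hx
  rcases List.mem_range'.mp hx with ⟨i, hi, rfl⟩
  rw [if_neg (by omega)]

theorem pv_count (m n : Nat) (hn : 0 < n) :
    (if (0:Int) < ((m*n:Nat):Int) then ((((m*n:Nat):Int) - 0 + (n:Int) - 1) / (n:Int)).toNat else 0) = m := by
  rcases Nat.eq_zero_or_pos m with hm | hm
  · subst hm; simp
  · rw [if_pos (by positivity)]
    have h : (((m*n:Nat):Int) - 0 + (n:Int) - 1) = ((m*n + n - 1 : Nat) : Int) := by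
      push_cast [Nat.cast_sub (by nlinarith : 1 ≤ m*n + n)]; ring
    rw [h, ← Int.natCast_div, Int.toNat_natCast]
    have hrw : m*n + n - 1 = (n-1) + n*m := by
      have := Nat.one_le_iff_ne_zero.mp hn
      have : m*n = n*m := Nat.mul_comm m n
      generalize m*n = K at *
      omega
    rw [hrw, Nat.add_mul_div_left _ _ hn, Nat.div_eq_of_lt (by omega)]
    omega

-- the index list range(0, m*n, n) of A's slicing loop
theorem pv_idx (m n : Nat) (hn : 0 < n) :
    PySem.List.pyRange 0 ((m*n : Nat) : Int) (n : Int)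
      = (List.range m).map (fun j => ((n * j : Nat) : Int)) := by
  rw [PySem.List.pyRange_of_pos _ _ (by exact_mod_cast hn), pv_count m n hn]
  simp

-- one slice of A's numbering tuple is one row of the grid
theorem pv_row (m n j : Nat) (hj : j < m) :
    List.take (n*j+n - n*j) (List.drop (n*j) ((List.range (m*n)).map (fun k => (1:Int) + (k:Nat)))) =
      (List.range n).map (fun c => ((j * n + c : Nat) : Int) + 1) := by
  apply List.ext_getElem
  · have hle : n*j + n ≤ m*n := by nlinarith
    simp only [List.length_take, List.length_drop, List.length_map, List.length_range]
    omega
  · intro i h1 h2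
    simp at h1 h2 ⊢
    ring

-- A's numbering grid, characterised row by row
theorem pv_grid_eq (h : List Int) (t : List (List Int)) (hn : 0 < h.length) :
    obtem_posicao_inteiros (h :: t) =
      (List.range (h :: t).length).map (fun r =>
        (List.range h.length).map (fun c => ((r * h.length + c : Nat) : Int) + 1)) := by
  have hget : ((PySem.List.pyGet? (h::t) 0).getD []) = h := by
    simp [PySem.List.pyGet?, PySem.List.pyIdx?]
  unfold obtem_posicao_inteiros
  rw [hget]
  dsimp only
  have e1 : ((((h :: t).length : Int)) * ((h.length : Int)) + 1) = (((h :: t).length * h.length : Nat) : Int) + 1 := by push_cast; ring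
  rw [e1, PySem.List.pyRange_one]
  have e2 : ((((h :: t).length * h.length : Nat) : Int) + 1 - 1).toNat = (h :: t).length * h.length := by push_cast; omega
  rw [e2]
  rw [List.length_map, List.length_range]
  rw [pv_idx _ _ hn, PySem.List.foldl_append_singleton_eq_map, List.nil_append, List.map_map]
  apply List.map_congr_left
  intro j hj
  simp only [List.mem_range] at hj
  simp only [Function.comp]
  have e3 : ((h.length * j : Nat) : Int) + (h.length : Int) = (((h.length*j + h.length) : Nat) : Int) := by push_cast; ring
  rw [e3, PySem.List.slice_toNat _ (by positivity) (by positivity)]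
  simp only [Int.toNat_natCast]
  exact pv_row _ _ _ hj

-- A's inner scan of one grid row: it records k % n exactly on row k / n
theorem pv_inner (n k r : Nat) (p : Option Int) (hn : 0 < n) :
    (PySem.List.pyRange 0 (n:Int) 1).foldl
      (fun q x => if PySem.List.pyGetD ((List.range n).map (fun c => ((r * n + c : Nat) : Int) + 1)) x 0 = ((k:Int)+1) then some x else q) p
    = if r = k / n then some ((k % n : Nat) : Int) else p := by
  rw [PySem.List.pyRange_one]
  have e0 : ((n:Int) - 0).toNat = n := by omega
  rw [e0, List.foldl_map]
  have hcond : ∀ c : Nat, c < n →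
      ((PySem.List.pyGetD ((List.range n).map (fun c => ((r * n + c : Nat) : Int) + 1)) ((0:Int)+(c:Nat)) 0 = ((k:Int)+1)) ↔ (r = k / n ∧ c = k % n)) := by
    intro c hc
    rw [PySem.List.pyGetD_eq_getElem _ _ (by positivity) (by simpa using (by exact_mod_cast hc : ((c:Int)) < (n:Int)))]
    have : ((0:Int)+(c:Nat)).toNat = c := by omega
    simp only [this]
    simp only [List.getElem_map, List.getElem_range]
    constructor
    · intro hEq
      have hk : r * n + c = k := by exact_mod_cast (by linarith [hEq] : ((r*n+c : Nat):Int) = (k:Int))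
      have hk' : c + n * r = k := by rw [Nat.mul_comm]; omega
      have := (Nat.div_mod_unique hn (a := k) (d := r) (c := c)).mpr ⟨hk', hc⟩
      exact ⟨this.1.symm, this.2.symm⟩
    · rintro ⟨hr, hcc⟩
      subst hr; subst hcc
      have : k / n * n + k % n = k := Nat.div_add_mod' k n
      rw [this]
  generalize hR : (List.map (fun c => ((r * n + c : Nat) : Int) + 1) (List.range n)) = R at hcond ⊢
  simp only [zero_add] at hcond ⊢
  set c0 := k % n with hc0def
  have hc0 : c0 < n := Nat.mod_lt _ hn
  by_cases hr : r = k / n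
  · rw [if_pos hr]
    have h1 : List.range' 0 c0 ++ [c0] = List.range' 0 (c0+1) := by
      simpa using (List.range'_concat (s:=0) (n:=c0) (step:=1)).symm
    have h2 : List.range' 0 (c0+1) ++ List.range' (c0+1) (n-c0-1) = List.range' 0 n := by
      simpa using (List.range'_append (s:=0) (m:=c0+1) (n:=n-c0-1) (step:=1))
      |>.trans (by congr 1; omega)
    have hsplit : List.range n = (List.range' 0 c0 ++ [c0]) ++ List.range' (c0+1) (n-c0-1) := by
      rw [List.range_eq_range', ← h2, h1]
    rw [hsplit, List.foldl_append, List.foldl_append]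
    rw [pv_foldl_id (List.range' 0 c0) _ p (by
      intro q x hx
      have hxlt : x < c0 := by
        rcases List.mem_range'.mp hx with ⟨i, hi, rfl⟩; omega
      rw [if_neg]
      rw [hcond x (by omega)]
      rintro ⟨-, rfl⟩; omega)]
    simp only [List.foldl_cons, List.foldl_nil]
    rw [if_pos ((hcond c0 hc0).mpr ⟨hr, rfl⟩)]
    apply pv_foldl_id
    intro q x hx
    have hxgt : c0 < x := by
      rcases List.mem_range'.mp hx with ⟨i, hi, rfl⟩; omega
    have hxlt : x < n := by
      rcases List.mem_range'.mp hx with ⟨i, hi, rfl⟩; omega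
    rw [if_neg]
    rw [hcond x hxlt]
    rintro ⟨-, rfl⟩; omega
  · rw [if_neg hr]
    apply pv_foldl_id
    intro q x hx
    rw [if_neg]
    rw [hcond x (List.mem_range.mp hx)]
    rintro ⟨hr', -⟩; exact hr hr'

-- .index(pos) on range(1, N+1) finds pos-1
theorem pv_index (N k : Nat) (hk : k < N) :
    PySem.List.index? (PySem.List.pyRange 1 ((N:Int)+1)) ((k:Int)+1) = some k := by
  rw [PySem.List.pyRange_one_append 1 ((k:Int)+1) ((N:Int)+1) (by omega) (by omega),
      PySem.List.pyRange_one_cons (a := ((k:Int)+1)) (b := ((N:Int)+1)) (by omega)]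
  apply (PySem.List.index?_eq_some_iff _ _ _).mpr
  refine ⟨_, _, rfl, ?_, ?_⟩
  · rw [PySem.List.length_pyRange_one]; omega
  · intro hmem
    have := (PySem.List.mem_pyRange_one).mp hmem
    omega

theorem pv_main (h : List Int) (t : List (List Int)) (pos : Int)
    (hn : 0 < h.length) (h1 : 1 ≤ pos)
    (h2 : pos ≤ ((h :: t).length : Int) * (h.length : Int)) :
    obtem_coluna (h :: t) pos = obtem_coluna_alt (h :: t) pos := by
  have hget : ((PySem.List.pyGet? (h::t) 0).getD []) = h := by
    simp [PySem.List.pyGet?, PySem.List.pyIdx?]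
  have hpos : pos = (((pos - 1).toNat : Nat) : Int) + 1 := by omega
  have hkmn : (pos - 1).toNat < (h :: t).length * h.length := by
    have : pos ≤ (((h :: t).length * h.length : Nat) : Int) := by push_cast; exact_mod_cast h2
    omega
  have hr0 : (pos - 1).toNat / h.length < (h :: t).length :=
    (Nat.div_lt_iff_lt_mul hn).mpr hkmn
  unfold obtem_coluna obtem_coluna_alt
  rw [hget]
  dsimp only
  rw [pv_grid_eq h t hn, hpos]
  have eN : (((h :: t).length : Int)) * ((h.length : Int)) + 1 = (((h :: t).length * h.length : Nat) : Int) + 1 := by push_cast; ring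
  have emod : PySem.Int.mod (((PySem.List.index? (PySem.List.pyRange 1 ((((h :: t).length : Int)) * ((h.length : Int)) + 1) 1) ((((pos - 1).toNat : Nat) : Int) + 1)).getD 0 : Nat) : Int) (h.length : Int)
      = ((((pos - 1).toNat % h.length : Nat)) : Int) := by
    rw [eN, pv_index _ _ hkmn]
    simp only [Option.getD_some]
    rw [PySem.Int.mod_natCast]
  rw [emod]
  have hposicao :
      ((List.range (h :: t).length).map (fun r =>
          (List.range h.length).map (fun c => ((r * h.length + c : Nat) : Int) + 1))).foldl
        (fun p i => (PySem.List.pyRange 0 (h.length : Int)).foldl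
          (fun p x => if PySem.List.pyGetD i x 0 = ((((pos - 1).toNat : Nat) : Int) + 1) then some x else p) p)
        none
      = some ((((pos - 1).toNat % h.length : Nat) : Int)) := by
    rw [List.foldl_map]
    have hF : (fun (p : Option Int) (r : Nat) =>
        (PySem.List.pyRange 0 (h.length : Int)).foldl
          (fun q x => if PySem.List.pyGetD ((List.range h.length).map (fun c => ((r * h.length + c : Nat) : Int) + 1)) x 0 = ((((pos - 1).toNat : Nat) : Int)+1) then some x else q) p)
        = fun p r => if r = (pos - 1).toNat / h.length then some ((((pos - 1).toNat % h.length : Nat) : Int)) else p := by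
      funext p r
      exact pv_inner h.length (pos - 1).toNat r p hn
    rw [hF, pv_setfold _ _ _ none hr0]
  rw [hposicao]
  simp only [Option.getD_some]
  rw [List.foldl_map (f := fun r => (List.range h.length).map (fun c => ((r * h.length + c : Nat) : Int) + 1))]
  rw [PySem.List.foldl_append_singleton_eq_map, List.nil_append]
  rw [PySem.List.pyRange_one]
  have e0 : (((h :: t).length : Int) - 0).toNat = (h :: t).length := by omega
  rw [e0, List.map_map]
  apply List.map_congr_left
  intro r hr
  simp only [List.mem_range] at hr
  simp only [Function.comp]
  have hc0 : (pos - 1).toNat % h.length < h.length := Nat.mod_lt _ hn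
  rw [PySem.List.pyGetD_eq_getElem _ _ (by positivity)
      (by simpa using (by exact_mod_cast hc0 : ((((pos - 1).toNat % h.length : Nat) : Int)) < (h.length : Int)))]
  simp only [Int.toNat_natCast, List.getElem_map, List.getElem_range]
  push_cast
  ring

-- ===== VERDICT (by name: the statement is the Claim_ definition above) =====
theorem obtem_coluna_spec : Claim_equal_obtem_coluna := by
  intro tab pos _ hpre
  obtain ⟨hne, hn, h1, h2⟩ := hpre
  unfold Spec_obtem_coluna
  cases tab with
  | nil => exact absurd rfl hne
  | cons h t => exact pv_main h t pos (by simpa using hn) h1 (by simpa using h2)
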